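-- pv_equiv track=rewrite | github.com/MrBrantCode/unitest_baseline | mut_generate/mist_train_cf/cf_65175/solution.py | stable_flight
-- ===== SOURCE A (Python) =====
-- def stable_flight(q, w, k):
--     # Check if q is palindromic
--     if q != q[::-1]:
--         return False
--     # Check if sum of q is within the permissible weight
--     if sum(q) > w:
--         return False
--     # Check if any of the elements exceed the individual limit, k
--     if any(i > k for i in q):
--         return False
--     return True
-- ===== SOURCE B (Python) =====
-- def stable_flight(q, w, k):
--     # Stack-based palindrome verification (push the first half, pop it back
--     # against the second half) instead of building a reversed copy; the same
--     # traversal folds (sum, max) so the weight/limit checks need no extra pass.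
--     stack = []
--     total = 0
--     mx = None
--     n = len(q)
--     half = n // 2
--     for idx, x in enumerate(q):
--         total += x
--         if mx is None or x > mx:
--             mx = x
--         if idx < half:
--             stack.append(x)
--         elif idx >= n - half:
--             if stack.pop() != x:
--                 return False
--     return total <= w and (mx is None or mx <= k)
-- ===== Notes on version B (the rewrite author's own statement) =====
-- stated objective: alternative
-- what changed: Replaces A's reversed-copy comparison plus separate sum and any-scan passes with a stack-based palindrome check (push the first half, pop it against the second half) whose single traversal also folds the sum and the running maximum, compared to w and k at the end.
import Mathlib
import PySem

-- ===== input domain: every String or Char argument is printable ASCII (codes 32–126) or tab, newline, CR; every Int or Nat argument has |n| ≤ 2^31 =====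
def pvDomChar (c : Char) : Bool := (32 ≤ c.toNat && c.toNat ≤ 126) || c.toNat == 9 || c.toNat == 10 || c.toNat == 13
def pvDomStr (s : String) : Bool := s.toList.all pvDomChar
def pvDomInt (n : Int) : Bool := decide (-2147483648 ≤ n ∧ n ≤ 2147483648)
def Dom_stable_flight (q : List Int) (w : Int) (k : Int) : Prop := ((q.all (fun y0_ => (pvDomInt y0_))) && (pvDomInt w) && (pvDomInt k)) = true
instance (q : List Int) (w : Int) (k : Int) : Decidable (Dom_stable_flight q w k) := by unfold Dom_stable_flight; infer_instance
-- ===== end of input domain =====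

-- B checks the palindrome with an explicit stack (push first half, pop against the
-- second half) instead of comparing against a reversed copy, folding (sum, max)
-- in the same traversal (alternative decomposition, same O(n) cost).

-- ===== PORT A =====
-- A: compare q with its reversed copy, then a sum pass, then an any-scan.
def stable_flight (q : List Int) (w : Int) (k : Int) : Bool :=
  if q ≠ q.reverse then false
  else if q.foldl (· + ·) 0 > w then false
  else if q.any (fun i => i > k) then false
  else true

-- ===== PORT B =====
-- running max update: `if mx is None or x > mx: mx = x`
def sf_step (mx : Option Int) (x : Int) : Option Int :=
  match mx with
  | none => some x
  | some m => if x > m then some x else some m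

-- the `for idx, x in enumerate(q)` loop; `none` encodes the early `return False`.
-- (`stack.pop()` on an empty stack is unreachable in `stable_flight_alt`'s run:
-- in the popping region the stack always holds the unmatched first-half elements.)
def sf_go (n half : Nat) : Nat → List Int → List Int → Int → Option Int → Option (Int × Option Int)
  | _, [], _, total, mx => some (total, mx)
  | idx, x :: rest, stack, total, mx =>
    let total := total + x
    let mx := sf_step mx x
    if idx < half then sf_go n half (idx + 1) rest (x :: stack) total mx
    else if n - half ≤ idx then
      match stack with
      | [] => none
      | s :: stack' => if s ≠ x then none else sf_go n half (idx + 1) rest stack' total mx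
    else sf_go n half (idx + 1) rest stack total mx

def stable_flight_alt (q : List Int) (w : Int) (k : Int) : Bool :=
  match sf_go q.length (q.length / 2) 0 q [] 0 none with
  | none => false
  | some (t, mx) =>
      decide (t ≤ w) && (match mx with | none => true | some m => decide (m ≤ k))

-- ===== PRECONDITION & SPEC =====
def Spec_stable_flight (q : List Int) (w : Int) (k : Int) (out : Bool) : Prop := out = stable_flight_alt q w k
instance (q : List Int) (w : Int) (k : Int) (out : Bool) : Decidable (Spec_stable_flight q w k out) := by unfold Spec_stable_flight; infer_instance

-- ===== CLAIM (what is proved, stated in full; the proofs are below) =====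
def Claim_equal_stable_flight : Prop := ∀ (q : List Int) (w : Int) (k : Int), Dom_stable_flight q w k → Spec_stable_flight q w k (stable_flight q w k)

-- ===== LEMMAS AND PROOFS =====

-- Phase 1: while idx stays below `half`, elements are pushed and accumulated.
lemma sf_push (n half : Nat) (xs : List Int) :
    ∀ (idx : Nat) (rest stack : List Int) (t : Int) (m : Option Int),
    idx + xs.length ≤ half →
    sf_go n half idx (xs ++ rest) stack t m =
      sf_go n half (idx + xs.length) rest (xs.reverse ++ stack) (t + xs.sum) (xs.foldl sf_step m) := by
  induction xs with
  | nil => intro idx rest stack t m _; simp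
  | cons x xs ih =>
    intro idx rest stack t m h
    have hlt : idx < half := by simp at h; omega
    simp only [List.cons_append, sf_go, if_pos hlt]
    rw [ih (idx + 1) rest (x :: stack) (t + x) (sf_step m x) (by simp at h ⊢; omega)]
    simp only [List.reverse_cons, List.sum_cons, List.foldl_cons, List.append_assoc,
      List.singleton_append, List.length_cons]
    congr 1
    · omega
    · ring_nf

-- Phase 2 (odd length only): the middle element is only accumulated.
lemma sf_mid (n half : Nat) (idx : Nat) (x : Int) (rest stack : List Int) (t : Int) (m : Option Int)
    (h1 : half ≤ idx) (h2 : idx < n - half) :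
    sf_go n half idx (x :: rest) stack t m =
      sf_go n half (idx + 1) rest stack (t + x) (sf_step m x) := by
  simp only [sf_go, if_neg (Nat.not_lt.mpr h1), if_neg (Nat.not_le.mpr h2)]

-- Phase 3: in the popping region the run succeeds iff the remaining input
-- equals the corresponding prefix of the stack.
lemma sf_pop (n half : Nat) (xs : List Int) :
    ∀ (idx : Nat) (stack : List Int) (t : Int) (m : Option Int),
    half ≤ idx → n - half ≤ idx → xs.length ≤ stack.length →
    sf_go n half idx xs stack t m =
      if stack.take xs.length = xs then some (t + xs.sum, xs.foldl sf_step m) else none := by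
  induction xs with
  | nil => intro idx stack t m _ _ _; simp [sf_go]
  | cons x xs ih =>
    intro idx stack t m h1 h2 hlen
    cases stack with
    | nil => simp at hlen
    | cons s stack' =>
      simp only [sf_go, if_neg (Nat.not_lt.mpr h1), if_pos h2]
      simp only [List.length_cons, List.take_succ_cons]
      by_cases hsx : s = x
      · subst hsx
        rw [if_neg (by simp), ih (idx + 1) stack' (t + s) (sf_step m s)
          (by omega) (by omega) (by simpa using hlen)]
        simp only [List.cons.injEq, true_and, List.sum_cons, List.foldl_cons]
        split_ifs <;> simp [add_assoc]
      · rw [if_pos hsx, if_neg (by simp [hsx])]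

-- max fold vs any-scan
lemma sf_max_ok (k : Int) (xs : List Int) :
    ∀ m : Option Int,
    (match xs.foldl sf_step m with | none => true | some v => decide (v ≤ k)) =
      ((match m with | none => true | some v => decide (v ≤ k)) && !(xs.any (fun i => i > k))) := by
  induction xs with
  | nil => intro m; cases m <;> simp
  | cons x xs ih =>
    intro m
    have hx : ∀ y : Int, (!decide (k < y)) = decide (y ≤ k) := by
      intro y; rw [← decide_not, decide_eq_decide]; exact not_lt
    simp only [List.foldl_cons, List.any_cons, Bool.not_or, ih (sf_step m x)]
    cases m with
    | none => simp [sf_step, hx]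
    | some v =>
      simp only [sf_step, hx]
      split_ifs with h <;> by_cases h1 : v ≤ k <;> by_cases h2 : x ≤ k <;>
        simp [h1, h2] <;> omega

-- a length-≤-1 list is its own reverse (the middle element of an odd-length list)
lemma rev_short (l : List Int) (h : l.length ≤ 1) : l.reverse = l := by
  rcases l with _ | ⟨y, _ | ⟨z, t⟩⟩
  · rfl
  · rfl
  · simp at h

-- "first half reversed = second half" is the full palindrome condition
lemma pal_halves (q : List Int) :
    ((q.take (q.length / 2)).reverse = q.drop (q.length - q.length / 2)) ↔ q = q.reverse := by
  constructor
  · intro hab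
    set n := q.length with hn
    set half := n / 2 with hh
    have hhalf : half ≤ n - half := by omega
    have hdq : q.take (n - half) ++ q.drop (n - half) = q := List.take_append_drop _ _
    have hd : q.take (n - half) = q.take half ++ (q.take (n - half)).drop half := by
      conv_lhs => rw [← List.take_append_drop half (q.take (n - half))]
      rw [List.take_take, min_eq_left hhalf]
    have hmlen : ((q.take (n - half)).drop half).length ≤ 1 := by
      rw [List.length_drop, List.length_take]; omega
    have hba : (q.drop (n - half)).reverse = q.take half := by
      rw [← hab, List.reverse_reverse]
    have hq2 : q = q.take half ++ ((q.take (n - half)).drop half ++ q.drop (n - half)) := by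
      conv_lhs => rw [← hdq, hd]
      rw [List.append_assoc]
    rw [hq2]
    simp only [List.reverse_append, List.append_assoc, hba, rev_short _ hmlen, hab]
  · intro hq
    rw [List.reverse_take]
    conv_rhs => rw [hq]
    rw [List.length_reverse]

-- the full run of B's loop, characterised
lemma alt_run (q : List Int) :
    sf_go q.length (q.length / 2) 0 q [] 0 none =
      (if (q.take (q.length / 2)).reverse = q.drop (q.length - q.length / 2)
       then some (q.sum, q.foldl sf_step none) else none) := by
  set n := q.length with hn
  set half := n / 2 with hh
  have hhn : half ≤ n := Nat.div_le_self n 2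
  have halen : (q.take half).length = half := by rw [List.length_take]; omega
  have hsplit : q.take half ++ q.drop half = q := List.take_append_drop half q
  have h1 : sf_go n half 0 q [] 0 none =
      sf_go n half half (q.drop half) (q.take half).reverse (q.take half).sum
        ((q.take half).foldl sf_step none) := by
    conv_lhs => rw [← hsplit]
    rw [sf_push n half (q.take half) 0 (q.drop half) [] 0 none (by omega)]
    rw [halen, List.append_nil, Nat.zero_add, zero_add]
  rw [h1]
  have hdl : (q.drop half).length = n - half := by rw [List.length_drop]
  rcases (by omega : n - half = half ∨ n - half = half + 1) with he | ho
  · -- even length: the popping phase starts immediately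
    rw [sf_pop n half (q.drop half) half (q.take half).reverse (q.take half).sum
        ((q.take half).foldl sf_step none) le_rfl (by omega)
        (by rw [hdl, List.length_reverse, halen]; omega)]
    rw [List.take_of_length_le (by rw [hdl, List.length_reverse, halen]; omega), he]
    rw [← List.sum_append, ← List.foldl_append, hsplit]
  · -- odd length: one middle element is only accumulated, then popping
    obtain ⟨x, c', hc⟩ : ∃ x c', q.drop half = x :: c' := by
      rcases hx : q.drop half with _ | ⟨x, c'⟩
      · rw [hx] at hdl; simp at hdl; omega
      · exact ⟨x, c', rfl⟩
    have hc'len : c'.length = half := by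
      have := hdl; rw [hc] at this; simp at this; omega
    rw [hc, sf_mid n half half x c' _ _ _ le_rfl (by omega)]
    rw [sf_pop n half c' (half + 1) (q.take half).reverse _ _ (by omega) (by omega)
        (by rw [List.length_reverse, halen]; omega)]
    rw [List.take_of_length_le (by rw [List.length_reverse, halen]; omega), ho]
    have hqc : q.take half ++ x :: c' = q := by rw [← hc, hsplit]
    have hdrop : q.drop (half + 1) = c' := by
      have : q.drop (half + 1) = (q.drop half).drop 1 := by rw [List.drop_drop]
      rw [this, hc, List.drop_one, List.tail_cons]
    rw [hdrop]
    have hsum : (q.take half).sum + x + c'.sum = q.sum := by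
      conv_rhs => rw [← hqc]
      rw [List.sum_append, List.sum_cons]; ring
    have hfold : c'.foldl sf_step (sf_step ((q.take half).foldl sf_step none) x) =
        q.foldl sf_step none := by
      conv_rhs => rw [← hqc]
      rw [List.foldl_append, List.foldl_cons]
    rw [hsum, hfold]

theorem stable_flight_eq (q : List Int) (w : Int) (k : Int) :
    stable_flight q w k = stable_flight_alt q w k := by
  unfold stable_flight stable_flight_alt
  rw [alt_run]
  by_cases hpal : q = q.reverse
  · rw [if_neg (not_ne_iff.mpr hpal), if_pos ((pal_halves q).mpr hpal)]
    dsimp only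
    have hmax := sf_max_ok k q none
    simp only [Bool.true_and] at hmax
    have hsum : q.foldl (· + ·) 0 = q.sum := List.sum_eq_foldl.symm
    rw [hsum]
    by_cases hw : q.sum > w
    · rw [if_pos hw]
      rw [decide_eq_false (not_le.mpr hw)]
      simp
    · rw [if_neg hw, decide_eq_true (not_lt.mp hw), Bool.true_and, hmax]
      cases ha : q.any (fun i => i > k) <;> simp
  · rw [if_pos hpal, if_neg (fun h => hpal ((pal_halves q).mp h))]

-- ===== VERDICT (by name: the statement is the Claim_ definition above) =====
theorem stable_flight_spec : Claim_equal_stable_flight := by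
  intro q w k _
  unfold Spec_stable_flight
  exact stable_flight_eq q w k
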